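-- pv_equiv track=rewrite | github.com/benchmarko/BMbench | bmbench.py | bench02
-- ===== SOURCE A (Python) =====
-- def bench02(n):
--   x = 0
--   sum = 0.0
--   for i in range(1, n + 1):
--     sum += i
--     if (sum >= n):
--       sum -= n
--       x += 1
--
--   return x
-- ===== SOURCE B (Python) =====
-- def bench02(n):
--   # Closed form: each time the running triangular sum reaches n it is reduced
--   # mod n, so the final count is T(n) // n = (n + 1) // 2 for n >= 1, else 0.
--   return (n + 1) // 2 if n >= 1 else 0
-- ===== Notes on version B (the rewrite author's own statement) =====
-- stated objective: faster
-- what changed: Replaced A's linear loop that accumulates the running triangular sum and counts how often it is reduced modulo n by a constant-time closed form: half of n plus one rounded down for positive n, and zero otherwise.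
import Mathlib
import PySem

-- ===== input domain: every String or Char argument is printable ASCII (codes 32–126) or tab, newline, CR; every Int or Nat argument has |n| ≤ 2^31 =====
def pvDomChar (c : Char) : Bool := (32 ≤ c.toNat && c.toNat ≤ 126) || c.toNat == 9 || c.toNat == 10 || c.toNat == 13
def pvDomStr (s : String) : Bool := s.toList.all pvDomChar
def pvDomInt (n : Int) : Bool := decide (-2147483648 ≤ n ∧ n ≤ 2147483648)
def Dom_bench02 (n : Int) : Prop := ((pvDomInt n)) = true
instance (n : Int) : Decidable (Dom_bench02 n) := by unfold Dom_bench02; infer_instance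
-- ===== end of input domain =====

-- ===== PORT A =====
-- B replaces A's O(n) accumulation loop with the closed form (n+1)//2 (faster, asymptotic).
-- A's `sum` is a Python float, but on Dom (|n| ≤ 2^31) every value it holds is an
-- integer below 2^33, exactly representable, so it is ported as Int (exact there).
def bench02 (n : Int) : Int :=
  (PySem.List.pyRange 1 (n + 1) 1).foldl
    (fun (st : Int × Int) i =>
      let sum := st.2 + i
      if sum ≥ n then (st.1 + 1, sum - n) else (st.1, sum))
    (0, 0) |>.1

-- ===== PORT B =====
def bench02_alt (n : Int) : Int :=
  if n ≥ 1 then PySem.Int.floordiv (n + 1) 2 else 0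

-- ===== PRECONDITION & SPEC =====
def Spec_bench02 (n : Int) (out : Int) : Prop := out = bench02_alt n
instance (n : Int) (out : Int) : Decidable (Spec_bench02 n out) := by unfold Spec_bench02; infer_instance

-- ===== CLAIM (what is proved, stated in full; the proofs are below) =====
def Claim_equal_bench02 : Prop := ∀ (n : Int), Dom_bench02 n → Spec_bench02 n (bench02 n)

-- ===== LEMMAS AND PROOFS =====

-- Loop invariant: starting from (x, s) with 0 ≤ s < n and every list element in [1, n],
-- the counter component ends at x + (s + sum of the list) / n.
theorem bench02_loop_count (n : Int) (hn : 0 < n) :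
    ∀ (l : List Int), (∀ i ∈ l, 1 ≤ i ∧ i ≤ n) → ∀ (x s : Int), 0 ≤ s → s < n →
      (l.foldl (fun (st : Int × Int) i =>
          let sum := st.2 + i
          if sum ≥ n then (st.1 + 1, sum - n) else (st.1, sum)) (x, s)).1
        = x + (s + l.sum) / n := by
  intro l
  induction l with
  | nil =>
      intro _ x s hs0 hsn
      simp [Int.ediv_eq_zero_of_lt hs0 hsn]
  | cons i t ih =>
      intro hmem x s hs0 hsn
      have hi : 1 ≤ i ∧ i ≤ n := hmem i (List.mem_cons_self ..)
      have hmem' : ∀ j ∈ t, 1 ≤ j ∧ j ≤ n := fun j hj => hmem j (List.mem_cons_of_mem _ hj)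
      simp only [List.foldl_cons]
      by_cases hge : s + i ≥ n
      · rw [if_pos hge]
        rw [ih hmem' (x + 1) (s + i - n) (by omega) (by omega)]
        have : s + (i :: t).sum = (s + i - n + t.sum) + 1 * n := by
          simp [List.sum_cons]; ring
        rw [this, Int.add_mul_ediv_right _ _ (by omega : n ≠ 0)]
        ring
      · rw [if_neg hge]
        rw [ih hmem' x (s + i) (by omega) (by omega)]
        simp [List.sum_cons]; ring_nf
-- Sum of 1..m is m*(m+1)/2.
theorem bench02_sum_range (m : Int) (hm : 0 ≤ m) :
    (PySem.List.pyRange 1 (m + 1) 1).sum = m * (m + 1) / 2 := by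
  induction m, hm using Int.le_induction with
  | base => simp [PySem.List.pyRange_one_singleton]
  | succ m hm ih =>
      rw [PySem.List.pyRange_one_append 1 (m + 1) (m + 1 + 1) (by omega) (by omega),
        PySem.List.pyRange_one_singleton, List.sum_append, ih]
      have h1 : (m + 1) * (m + 1 + 1) = m * (m + 1) + (m + 1) * 2 := by ring
      rw [h1, Int.add_mul_ediv_right _ _ (by norm_num : (2 : Int) ≠ 0)]
      simp

-- Dividing the triangular number by n gives (n+1)/2.
theorem bench02_tri_div (n : Int) (hn : 1 ≤ n) :
    n * (n + 1) / 2 / n = (n + 1) / 2 := by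
  rcases Int.even_or_odd n with ⟨k, hk⟩ | ⟨k, hk⟩
  · -- n = 2k even, k ≥ 1
    have hk1 : 1 ≤ k := by omega
    have hT : n * (n + 1) / 2 = k + n * k := by
      have : n * (n + 1) = (k + n * k) * 2 := by rw [hk]; ring
      rw [this, Int.mul_ediv_cancel _ (by norm_num : (2 : Int) ≠ 0)]
    rw [hT, Int.add_mul_ediv_left _ _ (by omega : n ≠ 0),
      Int.ediv_eq_zero_of_lt (by omega) (by omega)]
    omega
  · -- n = 2k+1 odd
    have hT : n * (n + 1) / 2 = n * (k + 1) := by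
      have : n * (n + 1) = (n * (k + 1)) * 2 := by rw [hk]; ring
      rw [this, Int.mul_ediv_cancel _ (by norm_num : (2 : Int) ≠ 0)]
    rw [hT, Int.mul_ediv_cancel_left _ (by omega : n ≠ 0)]
    omega

-- ===== VERDICT (by name: the statement is the Claim_ definition above) =====
theorem bench02_spec : Claim_equal_bench02 := by
  intro n _
  unfold Spec_bench02 bench02 bench02_alt
  by_cases hn : n ≥ 1
  · rw [if_pos hn,
      PySem.Int.floordiv_eq_ediv_of_pos (by norm_num : (0 : Int) < 2)]
    rw [bench02_loop_count n (by omega) _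
        (fun i hi => by
          have := (PySem.List.mem_pyRange_one).1 hi
          omega)
        0 0 le_rfl (by omega)]
    rw [bench02_sum_range n (by omega)]
    simp only [zero_add]
    exact bench02_tri_div n hn
  · rw [if_neg hn, PySem.List.pyRange_one_eq_nil (by omega)]
    simp
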